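-- pv_equiv track=rewrite | github.com/phantomzone-org/phantom-others | bool-api/boolean.py | arbitrary_bit_adder
-- ===== SOURCE A (Python) =====
-- def half_adder(A: bool, B: bool) -> (bool, bool):
--     '''
--     Adds two bits A and B and returns sum S and Carry C.
--     '''
--
--     out = A ^ B
--     carry = A & B
--
--     return (out, carry)
--
-- def full_adder(A: bool, B: bool, carry_in: bool) -> (bool, bool):
--     '''
--     Full adder. Returns (Sum, Carry out)
--     '''
--
--     # A xor B
--     A_xor_B = A ^ B
--
--     # S = (A xor B) xor C
--     out = A_xor_B ^ carry_in
--
--     # A and B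
--     A_and_B = A & B
--
--     # (A xor B) and C
--     A_xor_B__and_C = A_xor_B & carry_in
--
--     # C_out = (A and B) or ((A xor B) and C)
--     carry_out = A_and_B | A_xor_B__and_C
--
--     return (out, carry_out)
--
-- def arbitrary_bit_adder(a: [bool], b: [bool], carry_in: bool) -> ([bool], bool, bool):
--     '''
--     Returns (sum = (a + b + c_in) mod 2^N, c_{N-1}, c_{N-2}) where N indicates no. of bits.
--
--     - c_{N-1}, c_{N-2} are returned to set necessary overflow flag in higher level APIs
--     '''
--
--     N = len(a)
--     assert len(a) == len(b), f'len(a)={len(a)} != len(b)={len(b)}'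
--     assert N > 2
--
--     out = [False for i in range(N)]
--
--     start = 0
--     carry = carry_in
--     if carry_in == False:
--         # LSB has no carry_in
--         (out[0], carry) = half_adder(a[0], b[0])
--         start=1
--
--     for i in range(start, N-2):
--         (out[i], carry) = full_adder(a[i], b[i], carry_in=carry)
--
--     # handle 6,7
--     (out[N-2], c_Nminus2) = full_adder(a[N-2], b[N-2], carry_in=carry)
--     (out[N-1], c_Nminus1) = full_adder(a[N-1], b[N-1], carry_in=c_Nminus2)
--
--     return (out, c_Nminus1, c_Nminus2)
-- ===== SOURCE B (Python) =====
-- def arbitrary_bit_adder(a, b, carry_in):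
--     '''
--     Returns (sum = (a + b + c_in) mod 2^N, c_{N-1}, c_{N-2}) where N indicates no. of bits.
--     Arithmetic re-implementation: convert to integers (LSB-first), add once, read bits back.
--     '''
--     N = len(a)
--     assert len(a) == len(b), f'len(a)={len(a)} != len(b)={len(b)}'
--     assert N > 2
--
--     a_int = 0
--     for bit in reversed(a):
--         a_int = 2 * a_int + int(bit)
--     b_int = 0
--     for bit in reversed(b):
--         b_int = 2 * b_int + int(bit)
--
--     total = a_int + b_int + int(carry_in)
--     out = [bool((total >> i) & 1) for i in range(N)]
--     c_Nminus1 = bool((total >> N) & 1)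
--     mask = (1 << (N - 1)) - 1
--     c_Nminus2 = bool((((a_int & mask) + (b_int & mask) + int(carry_in)) >> (N - 1)) & 1)
--     return (out, c_Nminus1, c_Nminus2)
-- ===== Notes on version B (the rewrite author's own statement) =====
-- stated objective: simpler
-- what changed: Replaces the per-bit ripple of half/full adders with one integer addition: both bit lists are converted to integers (Horner, LSB-first), summed once with the carry-in, and the output bits and the two carries are read off by shifting and masking.
import Mathlib
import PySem

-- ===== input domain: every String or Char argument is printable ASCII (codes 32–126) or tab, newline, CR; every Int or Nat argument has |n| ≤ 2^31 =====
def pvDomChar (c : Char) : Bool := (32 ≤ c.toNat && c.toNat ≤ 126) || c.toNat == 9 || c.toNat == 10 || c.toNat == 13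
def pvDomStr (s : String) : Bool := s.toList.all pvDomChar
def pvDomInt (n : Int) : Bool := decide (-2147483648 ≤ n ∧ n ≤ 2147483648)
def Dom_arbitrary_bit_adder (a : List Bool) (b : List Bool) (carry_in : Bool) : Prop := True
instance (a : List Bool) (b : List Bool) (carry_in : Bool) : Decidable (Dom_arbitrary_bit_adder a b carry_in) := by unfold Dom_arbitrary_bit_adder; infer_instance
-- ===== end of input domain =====

-- B replaces the per-bit ripple of half/full adders by one integer addition (Horner conversion,
-- shift/mask read-back); objective: simpler. Equivalence is proved on Pre_ (the asserts of A).

-- ===== PORT A =====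
def half_adder (A : Bool) (B : Bool) : Bool × Bool := (A ^^ B, A && B)

def full_adder (A : Bool) (B : Bool) (carry_in : Bool) : Bool × Bool :=
  let A_xor_B := A ^^ B
  let out := A_xor_B ^^ carry_in
  let A_and_B := A && B
  let A_xor_B__and_C := A_xor_B && carry_in
  (out, A_and_B || A_xor_B__and_C)

-- the `for i in range(start, N-2)` loop; indices are Nat, exact since under Pre_ all accesses
-- of a[i], b[i], out[i] are in range (getD/set are exact there)
def adderLoop (a b : List Bool) (i stop : Nat) (out : List Bool) (carry : Bool) :
    List Bool × Bool :=
  if i < stop then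
    let r := full_adder (a.getD i false) (b.getD i false) carry
    adderLoop a b (i + 1) stop (out.set i r.1) r.2
  else (out, carry)
termination_by stop - i

def arbitrary_bit_adder (a : List Bool) (b : List Bool) (carry_in : Bool) :
    List Bool × Bool × Bool :=
  let N := a.length
  let out0 : List Bool := List.replicate N false
  -- the `if carry_in == False` branch (half_adder on the LSB, start = 1)
  let s : Nat × List Bool × Bool :=
    if carry_in = false then
      let r := half_adder (a.getD 0 false) (b.getD 0 false)
      (1, out0.set 0 r.1, r.2)
    else (0, out0, carry_in)
  let l := adderLoop a b s.1 (N - 2) s.2.1 s.2.2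
  let r2 := full_adder (a.getD (N - 2) false) (b.getD (N - 2) false) l.2
  let r1 := full_adder (a.getD (N - 1) false) (b.getD (N - 1) false) r2.2
  (((l.1.set (N - 2) r2.1).set (N - 1) r1.1), r1.2, r2.2)

-- ===== PORT B =====
-- a_int = 0; for bit in reversed(a): a_int = 2*a_int + int(bit)
def horner (l : List Bool) : Nat :=
  l.reverse.foldl (fun acc bit => 2 * acc + (if bit then 1 else 0)) 0

def arbitrary_bit_adder_alt (a : List Bool) (b : List Bool) (carry_in : Bool) :
    List Bool × Bool × Bool :=
  let N := a.length
  let aI := horner a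
  let bI := horner b
  let total := aI + bI + (if carry_in then 1 else 0)
  let out := (List.range N).map (fun i => decide ((total >>> i) &&& 1 = 1))
  let cN1 := decide ((total >>> N) &&& 1 = 1)
  let mask := (1 <<< (N - 1)) - 1
  let cN2 := decide ((((aI &&& mask) + (bI &&& mask) + (if carry_in then 1 else 0)) >>> (N - 1)) &&& 1 = 1)
  (out, cN1, cN2)

-- ===== PRECONDITION & SPEC =====
-- Pre_ = exactly A's two asserts (AssertionError otherwise): equal lengths and N > 2
def Pre_arbitrary_bit_adder (a : List Bool) (b : List Bool) (carry_in : Bool) : Prop :=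
  a.length = b.length ∧ 2 < a.length
instance (a : List Bool) (b : List Bool) (carry_in : Bool) : Decidable (Pre_arbitrary_bit_adder a b carry_in) := by unfold Pre_arbitrary_bit_adder; infer_instance

def pvWitness_arbitrary_bit_adder : List Bool × List Bool × Bool :=
  ([true, false, true], [false, true, true], false)

def Spec_arbitrary_bit_adder (a : List Bool) (b : List Bool) (carry_in : Bool) (out : List Bool × Bool × Bool) : Prop := out = arbitrary_bit_adder_alt a b carry_in
instance (a : List Bool) (b : List Bool) (carry_in : Bool) (out : List Bool × Bool × Bool) : Decidable (Spec_arbitrary_bit_adder a b carry_in out) := by unfold Spec_arbitrary_bit_adder; infer_instance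

-- ===== CLAIM (what is proved, stated in full; the proofs are below) =====
def Claim_equal_arbitrary_bit_adder : Prop := ∀ (a : List Bool) (b : List Bool) (carry_in : Bool), Dom_arbitrary_bit_adder a b carry_in → Pre_arbitrary_bit_adder a b carry_in → Spec_arbitrary_bit_adder a b carry_in (arbitrary_bit_adder a b carry_in)

-- ===== LEMMAS AND PROOFS =====

-- value of an LSB-first bit list
def bitsVal (l : List Bool) : Nat :=
  l.foldr (fun bit acc => 2 * acc + (if bit then 1 else 0)) 0

-- the ripple carry after k stages
def fc (a b : List Bool) (c : Bool) : Nat → Bool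
  | 0 => c
  | k + 1 => (a.getD k false && b.getD k false) ||
             ((a.getD k false ^^ b.getD k false) && fc a b c k)

-- the i-th sum bit
def sBit (a b : List Bool) (c : Bool) (i : Nat) : Bool :=
  (a.getD i false ^^ b.getD i false) ^^ fc a b c i

theorem horner_eq_bitsVal (l : List Bool) : horner l = bitsVal l := by
  simp [horner, bitsVal, List.foldl_reverse]

theorem bitsVal_cons (x : Bool) (l : List Bool) :
    bitsVal (x :: l) = 2 * bitsVal l + (if x then 1 else 0) := rfl

theorem bitsVal_append (xs ys : List Bool) :
    bitsVal (xs ++ ys) = bitsVal xs + 2 ^ xs.length * bitsVal ys := by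
  induction xs with
  | nil => simp [bitsVal]
  | cons x xs ih =>
    simp [bitsVal_cons, ih, pow_succ]
    ring

theorem bitsVal_lt (l : List Bool) : bitsVal l < 2 ^ l.length := by
  induction l with
  | nil => simp [bitsVal]
  | cons x xs ih =>
    simp [bitsVal_cons, pow_succ]
    cases x <;> simp <;> omega

theorem bitsVal_mod (l : List Bool) (k : Nat) (hk : k ≤ l.length) :
    bitsVal l % 2 ^ k = bitsVal (l.take k) := by
  conv_lhs => rw [← List.take_append_drop k l]
  rw [bitsVal_append, List.length_take, Nat.min_eq_left hk,
      Nat.add_mul_mod_self_left, Nat.mod_eq_of_lt]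
  exact lt_of_lt_of_le (bitsVal_lt _) (by simp [Nat.min_eq_left hk])

theorem bitsVal_bit (l : List Bool) (i : Nat) (hi : i < l.length) :
    bitsVal l / 2 ^ i % 2 = (if l.getD i false then 1 else 0) := by
  induction l generalizing i with
  | nil => simp at hi
  | cons x xs ih =>
    cases i with
    | zero => cases x <;> simp [bitsVal_cons] <;> omega
    | succ i =>
      have h1 : bitsVal (x :: xs) / 2 ^ (i + 1) = bitsVal xs / 2 ^ i := by
        rw [pow_succ, Nat.mul_comm (2 ^ i) 2, ← Nat.div_div_eq_div_mul]
        congr 1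
        rw [bitsVal_cons]; cases x <;> simp <;> omega
      rw [h1]
      simpa using ih (i := i) (by simpa using hi)

theorem bitsVal_singleton (x : Bool) : bitsVal [x] = if x then 1 else 0 := by
  cases x <;> rfl

-- the decomposition invariant: low k bits of (a + b + c) = sum bits + carry·2^k
theorem decomp (a b : List Bool) (c : Bool) (k : Nat)
    (ha : k ≤ a.length) (hb : k ≤ b.length) :
    bitsVal (a.take k) + bitsVal (b.take k) + (if c then 1 else 0) =
      bitsVal ((List.range k).map (sBit a b c)) +
        2 ^ k * (if fc a b c k then 1 else 0) := by
  induction k with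
  | zero => simp [bitsVal, fc]
  | succ k ih =>
    have ha' : k < a.length := by omega
    have hb' : k < b.length := by omega
    have ta : a.take (k + 1) = a.take k ++ [a.getD k false] := by
      rw [List.take_succ]
      congr 1
      simp [List.getElem?_eq_getElem ha', List.getD, List.getElem?_eq_getElem ha']
    have tb : b.take (k + 1) = b.take k ++ [b.getD k false] := by
      rw [List.take_succ]
      congr 1
      simp [List.getElem?_eq_getElem hb', List.getD, List.getElem?_eq_getElem hb']
    have hr : (List.range (k + 1)).map (sBit a b c) =
        (List.range k).map (sBit a b c) ++ [sBit a b c k] := by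
      rw [List.range_succ, List.map_append]; rfl
    have lta : (a.take k).length = k := by simp [Nat.min_eq_left (le_of_lt ha')]
    have ltb : (b.take k).length = k := by simp [Nat.min_eq_left (le_of_lt hb')]
    have ltr : ((List.range k).map (sBit a b c)).length = k := by simp
    rw [ta, tb, hr, bitsVal_append, bitsVal_append, bitsVal_append, lta, ltb, ltr,
        bitsVal_singleton, bitsVal_singleton, bitsVal_singleton]
    have hfc := ih (le_of_lt ha') (le_of_lt hb')
    have key : ∀ x y z : Bool, ((if x then 1 else 0) + (if y then 1 else 0) +
        (if z then 1 else 0) : ℕ) =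
        (if ((x ^^ y) ^^ z) then 1 else 0) +
          2 * (if ((x && y) || ((x ^^ y) && z)) then 1 else 0) := by decide
    have k2 : ((if a.getD k false then 1 else 0) + (if b.getD k false then 1 else 0) +
        (if fc a b c k then 1 else 0) : ℕ) =
        (if sBit a b c k then 1 else 0) + 2 * (if fc a b c (k + 1) then 1 else 0) :=
      key (a.getD k false) (b.getD k false) (fc a b c k)
    rw [pow_succ]
    zify at hfc k2 ⊢
    linear_combination hfc + (2 : ℤ) ^ k * k2

-- extracting a bit below the carry position
theorem low_bit (v F i N : Nat) (hi : i < N) (hF : F ≤ 1) :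
    (v + F * 2 ^ N) / 2 ^ i % 2 = v / 2 ^ i % 2 := by
  have h : F * 2 ^ N = F * 2 ^ (N - i - 1) * 2 * 2 ^ i := by
    rw [Nat.mul_assoc, Nat.mul_assoc, ← pow_succ', ← pow_add]
    congr 2
    omega
  rw [h, Nat.add_mul_div_right _ _ (Nat.two_pow_pos i), Nat.add_mul_mod_self_right]

-- extracting the carry bit
theorem high_bit (v F N : Nat) (hv : v < 2 ^ N) (hF : F ≤ 1) :
    (v + F * 2 ^ N) / 2 ^ N % 2 = F := by
  rw [Nat.add_mul_div_right _ _ (Nat.two_pow_pos N), Nat.div_eq_of_lt hv]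
  omega

theorem shift_mask (n i : Nat) : (n >>> i) &&& 1 = n / 2 ^ i % 2 := by
  rw [Nat.shiftRight_eq_div_pow, Nat.and_one_is_mod]

theorem decide_eq_bool (n : Nat) (x : Bool) (h : n = (if x then 1 else 0)) :
    decide (n = 1) = x := by subst h; cases x <;> simp

-- ==== characterization of port B ====
theorem portB_eq (a b : List Bool) (c : Bool)
    (hlen : a.length = b.length) (h3 : 2 < a.length) :
    arbitrary_bit_adder_alt a b c =
      ((List.range a.length).map (sBit a b c),
        fc a b c a.length, fc a b c (a.length - 1)) := by
  set N := a.length with hN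
  have hdec := decomp a b c N (le_refl _) (le_of_eq hlen)
  rw [List.take_length, (by rw [← hlen] : b.take N = b.take b.length), List.take_length] at hdec
  have hdec' := decomp a b c (N - 1) (by omega) (by omega)
  have hvlt : bitsVal ((List.range N).map (sBit a b c)) < 2 ^ N := by
    have := bitsVal_lt ((List.range N).map (sBit a b c))
    simpa using this
  have hvlt' : bitsVal ((List.range (N - 1)).map (sBit a b c)) < 2 ^ (N - 1) := by
    have := bitsVal_lt ((List.range (N - 1)).map (sBit a b c))
    simpa using this
  have hFle : (if fc a b c N then 1 else 0) ≤ 1 := by split <;> omega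
  have hFle' : (if fc a b c (N - 1) then 1 else 0) ≤ 1 := by split <;> omega
  unfold arbitrary_bit_adder_alt
  simp only [← hN, horner_eq_bitsVal]
  refine Prod.ext ?_ (Prod.ext ?_ ?_)
  · -- output bits
    simp only
    apply List.map_congr_left
    intro i hi
    rw [List.mem_range] at hi
    apply decide_eq_bool
    rw [shift_mask, hdec, Nat.mul_comm, low_bit _ _ _ _ hi hFle,
        bitsVal_bit _ i (by simpa using hi)]
    simp [List.getD, List.getElem?_map, List.getElem?_range, hi]
  · -- c_{N-1}
    simp only
    apply decide_eq_bool
    rw [shift_mask, hdec, Nat.mul_comm, high_bit _ _ _ hvlt hFle]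
  · -- c_{N-2}
    simp only
    have hm : (1 <<< (N - 1)) - 1 = 2 ^ (N - 1) - 1 := by
      rw [Nat.shiftLeft_eq, one_mul]
    have hmodA : bitsVal a &&& ((1 <<< (N - 1)) - 1) = bitsVal (a.take (N - 1)) := by
      rw [hm, Nat.and_two_pow_sub_one_eq_mod, bitsVal_mod _ _ (by omega)]
    have hmodB : bitsVal b &&& ((1 <<< (N - 1)) - 1) = bitsVal (b.take (N - 1)) := by
      rw [hm, Nat.and_two_pow_sub_one_eq_mod, bitsVal_mod _ _ (by omega)]
    rw [hmodA, hmodB]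
    apply decide_eq_bool
    rw [shift_mask, hdec', Nat.mul_comm, high_bit _ _ _ hvlt' hFle']

-- ==== characterization of port A ====
theorem full_adder_step (a b : List Bool) (c : Bool) (i : Nat) :
    full_adder (a.getD i false) (b.getD i false) (fc a b c i) =
      (sBit a b c i, fc a b c (i + 1)) := by
  simp [full_adder, sBit, fc]

theorem adderLoop_spec (a b : List Bool) (c : Bool) :
    ∀ (n i : Nat) (out : List Bool), i + n ≤ out.length →
      (adderLoop a b i (i + n) out (fc a b c i)).2 = fc a b c (i + n) ∧
      (adderLoop a b i (i + n) out (fc a b c i)).1.length = out.length ∧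
      ∀ j, (adderLoop a b i (i + n) out (fc a b c i)).1.getD j false =
        if i ≤ j ∧ j < i + n then sBit a b c j else out.getD j false := by
  intro n
  induction n with
  | zero =>
    intro i out _
    rw [adderLoop]
    rw [if_neg (by omega : ¬ i < i + 0)]
    refine ⟨rfl, rfl, ?_⟩
    intro j
    rw [if_neg (by omega)]
  | succ n ih =>
    intro i out hlen
    rw [adderLoop]
    simp only [show i < i + (n + 1) by omega, if_pos, full_adder_step]
    have hlen' : (i + 1) + n ≤ (out.set i (sBit a b c i)).length := by
      simp; omega
    have heq : i + (n + 1) = (i + 1) + n := by omega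
    rw [heq]
    obtain ⟨h2, hl, hg⟩ := ih (i + 1) (out.set i (sBit a b c i)) hlen'
    refine ⟨h2, by simpa using hl, ?_⟩
    intro j
    rw [hg j]
    by_cases hj1 : i + 1 ≤ j ∧ j < i + 1 + n
    · rw [if_pos hj1, if_pos (by omega)]
    · rw [if_neg hj1]
      by_cases hj2 : i ≤ j ∧ j < i + 1 + n
      · have hji : j = i := by omega
        subst hji
        rw [if_pos (by omega)]
        simp [List.getD, List.getElem?_set_self, show j < out.length by omega]
      · rw [if_neg (by omega)]
        have hne : j ≠ i := by omega
        simp [List.getD, List.getElem?_set_ne (by omega : i ≠ j)]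

theorem portA_eq (a b : List Bool) (c : Bool)
    (hlen : a.length = b.length) (h3 : 2 < a.length) :
    arbitrary_bit_adder a b c =
      ((List.range a.length).map (sBit a b c),
        fc a b c a.length, fc a b c (a.length - 1)) := by
  set N := a.length with hN
  -- the start state is (start, out0', fc start) for start = 0 or 1
  unfold arbitrary_bit_adder
  simp only [← hN]
  have main : ∀ (start : Nat) (out1 : List Bool), out1.length = N →
      start ≤ 1 →
      (∀ j, out1.getD j false = if j < start then sBit a b c j else false) →
      (((adderLoop a b start (N - 2) out1 (fc a b c start)).1.set (N - 2)
          (full_adder (a.getD (N-2) false) (b.getD (N-2) false)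
            (adderLoop a b start (N - 2) out1 (fc a b c start)).2).1).set (N - 1)
          (full_adder (a.getD (N-1) false) (b.getD (N-1) false)
            (full_adder (a.getD (N-2) false) (b.getD (N-2) false)
              (adderLoop a b start (N - 2) out1 (fc a b c start)).2).2).1,
        (full_adder (a.getD (N-1) false) (b.getD (N-1) false)
            (full_adder (a.getD (N-2) false) (b.getD (N-2) false)
              (adderLoop a b start (N - 2) out1 (fc a b c start)).2).2).2,
        (full_adder (a.getD (N-2) false) (b.getD (N-2) false)
          (adderLoop a b start (N - 2) out1 (fc a b c start)).2).2) =
      ((List.range N).map (sBit a b c), fc a b c N, fc a b c (N - 1)) := by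
    intro start out1 hol hs1 hout1
    have hrange : N - 2 = start + (N - 2 - start) := by omega
    obtain ⟨hc2, hl2, hg2⟩ := adderLoop_spec a b c (N - 2 - start) start out1
      (by omega)
    rw [← hrange] at hc2 hl2 hg2
    rw [hc2]
    have e1 : full_adder (a.getD (N-2) false) (b.getD (N-2) false) (fc a b c (N-2)) =
        (sBit a b c (N-2), fc a b c (N-1)) := by
      have := full_adder_step a b c (N-2)
      rw [this]
      congr 2
      omega
    have e2 : full_adder (a.getD (N-1) false) (b.getD (N-1) false) (fc a b c (N-1)) =
        (sBit a b c (N-1), fc a b c N) := by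
      have := full_adder_step a b c (N-1)
      rw [this]
      congr 2
      omega
    rw [e1]
    simp only
    rw [e2]
    simp only
    refine Prod.ext ?_ (Prod.ext rfl rfl)
    simp only
    -- list equality by extensionality on getD
    apply List.ext_getElem
    · simp [hl2, hol]
    · intro j hj1 hj2
      have hjN : j < N := by simpa [hl2, hol] using hj1
      have hget : ∀ (l : List Bool) (hj : j < l.length), l[j] = l.getD j false := by
        intro l hj
        simp [List.getD, List.getElem?_eq_getElem hj]
      rw [hget _ hj1, hget _ hj2]
      have rhsj : ((List.range N).map (sBit a b c)).getD j false = sBit a b c j := by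
        simp [List.getD, List.getElem?_eq_getElem, hjN]
      rw [rhsj]
      have hlen1 : ((adderLoop a b start (N - 2) out1 (fc a b c start)).1.set (N - 2)
          (sBit a b c (N-2))).length = N := by simp [hl2, hol]
      by_cases hj : j = N - 1
      · subst hj
        simp [List.getD, List.getElem?_set_self, show N - 1 < N by omega, hlen1]
      · rw [List.getD, List.getElem?_set_ne (by omega : N - 1 ≠ j)]
        by_cases hj' : j = N - 2
        · subst hj'
          simp [List.getD, List.getElem?_set_self, show N - 2 < N by omega, hl2, hol]
        · rw [List.getElem?_set_ne (by omega : N - 2 ≠ j), ← List.getD]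
          rw [hg2 j]
          by_cases hjs : start ≤ j ∧ j < N - 2
          · rw [if_pos hjs]
          · rw [if_neg hjs, hout1 j, if_pos (by omega)]
  by_cases hc : c = false
  · subst hc
    simp only [if_pos rfl]
    have hha : half_adder (a.getD 0 false) (b.getD 0 false) =
        (sBit a b false 0, fc a b false 1) := by
      have h : ∀ x y : Bool, half_adder x y =
          ((x ^^ y) ^^ false, (x && y) || ((x ^^ y) && false)) := by decide
      exact h (a.getD 0 false) (b.getD 0 false)
    rw [hha]
    exact main 1 ((List.replicate N false).set 0 (sBit a b false 0)) (by simp)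
      (by omega) (by
        intro j
        by_cases hj : j = 0
        · subst hj
          rw [if_pos (by omega)]
          simp [List.getD, List.getElem?_set_self, show 0 < N by omega]
        · rw [if_neg (by omega)]
          rw [List.getD, List.getElem?_set_ne (by omega : (0 : ℕ) ≠ j)]
          simp only [List.getElem?_replicate]
          split <;> rfl)
  · rw [if_neg hc]
    have hct : c = true := by cases c <;> simp_all
    subst hct
    exact main 0 (List.replicate N false) (by simp) (by omega)
      (by
        intro j
        rw [if_neg (by omega : ¬ j < 0)]
        simp only [List.getD, List.getElem?_replicate]
        split <;> rfl)

-- ===== VERDICT (by name: the statement is the Claim_ definition above) =====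
theorem arbitrary_bit_adder_spec : Claim_equal_arbitrary_bit_adder := by
  intro a b c _ hpre
  unfold Spec_arbitrary_bit_adder
  rw [portA_eq a b c hpre.1 hpre.2, portB_eq a b c hpre.1 hpre.2]
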